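-- pv_equiv track=rewrite | github.com/QraczQQ/Autodarts_raczqq | led_ir.py | frame_fill_even_odd
-- ===== SOURCE A (Python) =====
-- LED_COUNT = 28
--
-- def frame_fill_even_odd(mode: str, rgb_even=(0,0,0), rgb_odd=(0,0,0)):
--     out = []
--     for i in range(LED_COUNT):
--         if mode == 'even':
--             out.append(rgb_even if i % 2 == 0 else (0,0,0))
--         elif mode == 'odd':
--             out.append(rgb_odd if i % 2 == 1 else (0,0,0))
--         else:  # 'all'
--             out.append(rgb_even)
--     return out
-- ===== SOURCE B (Python) =====
-- LED_COUNT = 28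
--
-- def frame_fill_even_odd(mode: str, rgb_even=(0,0,0), rgb_odd=(0,0,0)):
--     if mode == 'even':
--         out = [(0,0,0)] * LED_COUNT
--         out[::2] = [rgb_even] * (LED_COUNT // 2)
--         return out
--     if mode == 'odd':
--         out = [(0,0,0)] * LED_COUNT
--         out[1::2] = [rgb_odd] * (LED_COUNT // 2)
--         return out
--     return [rgb_even] * LED_COUNT
-- ===== Notes on version B (the rewrite author's own statement) =====
-- stated objective: idiomatic
-- what changed: B branches on the mode once and builds the whole frame by list replication plus strided slice assignment instead of deciding each element inside a per-LED loop.
import Mathlib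
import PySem

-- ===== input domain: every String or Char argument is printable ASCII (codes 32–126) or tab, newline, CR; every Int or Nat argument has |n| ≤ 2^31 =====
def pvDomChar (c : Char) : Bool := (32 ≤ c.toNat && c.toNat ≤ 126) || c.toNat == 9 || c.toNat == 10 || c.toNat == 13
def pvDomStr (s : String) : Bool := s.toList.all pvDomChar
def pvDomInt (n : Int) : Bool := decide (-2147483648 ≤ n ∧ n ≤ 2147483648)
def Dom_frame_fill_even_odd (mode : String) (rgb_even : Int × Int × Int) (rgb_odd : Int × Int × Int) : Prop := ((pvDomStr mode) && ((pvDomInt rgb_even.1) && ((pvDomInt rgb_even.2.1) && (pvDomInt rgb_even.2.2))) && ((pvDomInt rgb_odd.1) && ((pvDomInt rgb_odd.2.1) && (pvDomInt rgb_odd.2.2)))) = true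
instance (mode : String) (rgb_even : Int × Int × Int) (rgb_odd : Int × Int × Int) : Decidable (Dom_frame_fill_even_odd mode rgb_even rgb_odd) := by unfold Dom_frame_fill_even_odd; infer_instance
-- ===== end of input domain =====

-- B branches on the mode once and builds the frame by replication plus strided slice
-- assignment instead of A's per-LED loop with the mode test inside (objective: idiomatic).

-- ===== PORT A =====
-- A: one loop over range(LED_COUNT), mode tested inside the loop, appending per element.
def frame_fill_even_odd (mode : String) (rgb_even : Int × Int × Int) (rgb_odd : Int × Int × Int) : List (Int × Int × Int) :=
  (PySem.List.pyRange 0 28 1).foldl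
    (fun out i =>
      if mode = "even" then
        out ++ [if i % 2 = 0 then rgb_even else ((0 : Int), (0 : Int), (0 : Int))]
      else if mode = "odd" then
        out ++ [if i % 2 = 1 then rgb_odd else ((0 : Int), (0 : Int), (0 : Int))]
      else
        out ++ [rgb_even])
    []

-- ===== PORT B =====
-- Python slice assignment out[start::2] = [v]*14 : set each index start, start+2, … in turn.
def pvSetStride (start : Int) (v : Int × Int × Int) (base : List (Int × Int × Int)) : List (Int × Int × Int) :=
  (PySem.List.pyRange start 28 2).foldl (fun out i => out.set i.toNat v) base

def frame_fill_even_odd_alt (mode : String) (rgb_even : Int × Int × Int) (rgb_odd : Int × Int × Int) : List (Int × Int × Int) :=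
  if mode = "even" then
    pvSetStride 0 rgb_even (List.replicate 28 ((0 : Int), (0 : Int), (0 : Int)))
  else if mode = "odd" then
    pvSetStride 1 rgb_odd (List.replicate 28 ((0 : Int), (0 : Int), (0 : Int)))
  else
    List.replicate 28 rgb_even

-- ===== PRECONDITION & SPEC =====
def Spec_frame_fill_even_odd (mode : String) (rgb_even : Int × Int × Int) (rgb_odd : Int × Int × Int) (out : List (Int × Int × Int)) : Prop := out = frame_fill_even_odd_alt mode rgb_even rgb_odd
instance (mode : String) (rgb_even : Int × Int × Int) (rgb_odd : Int × Int × Int) (out : List (Int × Int × Int)) : Decidable (Spec_frame_fill_even_odd mode rgb_even rgb_odd out) := by unfold Spec_frame_fill_even_odd; infer_instance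

-- ===== CLAIM (what is proved, stated in full; the proofs are below) =====
def Claim_equal_frame_fill_even_odd : Prop := ∀ (mode : String) (rgb_even : Int × Int × Int) (rgb_odd : Int × Int × Int), Dom_frame_fill_even_odd mode rgb_even rgb_odd → Spec_frame_fill_even_odd mode rgb_even rgb_odd (frame_fill_even_odd mode rgb_even rgb_odd)

-- ===== LEMMAS AND PROOFS =====
-- In the fall-through ('all') branch A appends rgb_even once per loop step.
theorem pv_foldl_append_const (v : Int × Int × Int) (l : List Int) (acc : List (Int × Int × Int)) :
    l.foldl (fun out (_ : Int) => out ++ [v]) acc = acc ++ List.replicate l.length v := by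
  induction l generalizing acc with
  | nil => simp
  | cons x xs ih =>
      simp only [List.foldl, ih, List.length_cons, List.replicate_succ]
      rw [List.append_assoc]
      rfl

theorem pv_A_even (re ro : Int × Int × Int) : frame_fill_even_odd "even" re ro = [re,(0,0,0),re,(0,0,0),re,(0,0,0),re,(0,0,0),re,(0,0,0),re,(0,0,0),re,(0,0,0),re,(0,0,0),re,(0,0,0),re,(0,0,0),re,(0,0,0),re,(0,0,0),re,(0,0,0),re,(0,0,0)] := by
  norm_num [frame_fill_even_odd,
    show PySem.List.pyRange 0 28 1 = [0,1,2,3,4,5,6,7,8,9,10,11,12,13,14,15,16,17,18,19,20,21,22,23,24,25,26,27] from by decide,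
    List.foldl]

theorem pv_A_odd (re ro : Int × Int × Int) : frame_fill_even_odd "odd" re ro = [(0,0,0),ro,(0,0,0),ro,(0,0,0),ro,(0,0,0),ro,(0,0,0),ro,(0,0,0),ro,(0,0,0),ro,(0,0,0),ro,(0,0,0),ro,(0,0,0),ro,(0,0,0),ro,(0,0,0),ro,(0,0,0),ro,(0,0,0),ro] := by
  have h : ("odd" : String) ≠ "even" := by decide
  norm_num [frame_fill_even_odd, h,
    show PySem.List.pyRange 0 28 1 = [0,1,2,3,4,5,6,7,8,9,10,11,12,13,14,15,16,17,18,19,20,21,22,23,24,25,26,27] from by decide,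
    List.foldl]

-- ===== VERDICT (by name: the statement is the Claim_ definition above) =====
theorem frame_fill_even_odd_spec : Claim_equal_frame_fill_even_odd := by
  intro mode re ro _
  unfold Spec_frame_fill_even_odd
  by_cases h1 : mode = "even"
  · subst h1; rw [pv_A_even]; rfl
  · by_cases h2 : mode = "odd"
    · subst h2; rw [pv_A_odd]; rfl
    · unfold frame_fill_even_odd frame_fill_even_odd_alt
      simp only [if_neg h1, if_neg h2]
      rw [pv_foldl_append_const]
      rfl
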